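-- pv_equiv track=rewrite | github.com/Exa-Networks/exabgp | lab/benchmark_update_size.py | current_approach
-- ===== SOURCE A (Python) =====
-- def current_approach(n_nlris: int, nlri_size: int = 23) -> int:
--     """Simulates current approach: concatenate to check length."""
--     msg_size = 4000
--     announced = b''
--     withdraws = b''
--     yields = 0
--
--     for _ in range(n_nlris):
--         packed = b'x' * nlri_size
--         if len(announced + withdraws + packed) <= msg_size:
--             announced += packed
--         else:
--             yields += 1
--             announced = packed
--             withdraws = b''
--
--     return yields
-- ===== SOURCE B (Python) =====
-- def current_approach(n_nlris: int, nlri_size: int = 23) -> int: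
--     """Closed form: capacity = 4000 // nlri_size items fit per message;
--     the buffer flushes once for each full block after the first item."""
--     if n_nlris <= 0 or nlri_size <= 0:
--         return 0
--     capacity = 4000 // nlri_size
--     if capacity == 0:
--         return n_nlris
--     return (n_nlris - 1) // capacity
-- ===== Notes on version B (the rewrite author's own statement) =====
-- stated objective: faster
-- what changed: Replaces the byte-buffer simulation loop with an O(1) closed form: capacity = 4000 // nlri_size and flushes = (n_nlris - 1) // capacity (0 for non-positive inputs, n_nlris when nothing fits).
import Mathlib
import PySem

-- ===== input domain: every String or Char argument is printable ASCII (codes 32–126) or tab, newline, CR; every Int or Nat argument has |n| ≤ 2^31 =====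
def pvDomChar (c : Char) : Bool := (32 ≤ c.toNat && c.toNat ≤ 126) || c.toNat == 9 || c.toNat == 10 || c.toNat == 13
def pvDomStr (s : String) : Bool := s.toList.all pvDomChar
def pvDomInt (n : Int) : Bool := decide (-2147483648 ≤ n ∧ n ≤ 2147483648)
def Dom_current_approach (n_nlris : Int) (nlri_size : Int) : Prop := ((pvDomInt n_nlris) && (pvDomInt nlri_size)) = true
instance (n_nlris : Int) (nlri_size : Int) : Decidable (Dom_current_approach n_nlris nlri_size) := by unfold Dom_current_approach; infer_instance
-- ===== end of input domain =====

-- B replaces A's byte-buffer simulation loop with an O(1) capacity-arithmetic closed form.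

-- ===== PORT A =====
-- bytes are modelled as List Char ('x' repeated); b'x' * k with k ≤ 0 is empty, matching
-- List.replicate nlri_size.toNat (Int.toNat clamps negatives to 0 exactly like Python's repeat).
def current_approach (n_nlris : Int) (nlri_size : Int) : Int :=
  let msg_size : Int := 4000
  let announced : List Char := []
  let withdraws : List Char := []
  let yields : Int := 0
  let st :=
    (PySem.List.pyRange 0 n_nlris 1).foldl
      (fun (st : List Char × List Char × Int) _ =>
        let announced := st.1
        let withdraws := st.2.1
        let yields := st.2.2
        let packed := List.replicate nlri_size.toNat 'x'
        if ((announced ++ withdraws ++ packed).length : Int) ≤ msg_size then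
          (announced ++ packed, withdraws, yields)
        else
          (packed, ([] : List Char), yields + 1))
      (announced, withdraws, yields)
  st.2.2

-- ===== PORT B =====
def current_approach_alt (n_nlris : Int) (nlri_size : Int) : Int :=
  if n_nlris ≤ 0 ∨ nlri_size ≤ 0 then 0
  else
    let capacity := PySem.Int.floordiv 4000 nlri_size
    if capacity = 0 then n_nlris
    else PySem.Int.floordiv (n_nlris - 1) capacity

-- ===== PRECONDITION & SPEC =====
def Spec_current_approach (n_nlris : Int) (nlri_size : Int) (out : Int) : Prop := out = current_approach_alt n_nlris nlri_size
instance (n_nlris : Int) (nlri_size : Int) (out : Int) : Decidable (Spec_current_approach n_nlris nlri_size out) := by unfold Spec_current_approach; infer_instance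

-- ===== CLAIM (what is proved, stated in full; the proofs are below) =====
def Claim_equal_current_approach : Prop := ∀ (n_nlris : Int) (nlri_size : Int), Dom_current_approach n_nlris nlri_size → Spec_current_approach n_nlris nlri_size (current_approach n_nlris nlri_size)

-- ===== LEMMAS AND PROOFS =====

-- A's loop body, as a function of the state (announced, withdraws, yields); s = nlri_size.toNat
def pvStep (s : Nat) (st : List Char × List Char × Int) : List Char × List Char × Int :=
  if ((st.1 ++ st.2.1 ++ List.replicate s 'x').length : Int) ≤ 4000 then
    (st.1 ++ List.replicate s 'x', st.2.1, st.2.2)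
  else
    (List.replicate s 'x', ([] : List Char), st.2.2 + 1)

-- a fold that ignores the list's elements is an iterate of its length
theorem pvFoldlConst {α β : Type} (f : β → β) (l : List α) (init : β) :
    l.foldl (fun b _ => f b) init = f^[l.length] init := by
  induction l generalizing init with
  | nil => rfl
  | cons a t ih => simp [List.foldl, ih, Function.iterate_succ_apply]

-- s = 0: the buffer stays empty and nothing ever flushes
theorem pvIter_zero (k : Nat) : (pvStep 0)^[k] (([] : List Char), ([] : List Char), (0 : Int)) = ([], [], 0) :=
  Function.iterate_fixed (by simp [pvStep]) k

-- s > 4000: every single item overflows, so every iteration flushes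
theorem pvIter_big (s : Nat) (hs : 4000 < s) (k : Nat) :
    (pvStep s)^[k] (([] : List Char), ([] : List Char), (0 : Int)) =
      ((if k = 0 then [] else List.replicate s 'x'), [], (k : Int)) := by
  induction k with
  | zero => simp
  | succ k ih =>
    rw [Function.iterate_succ_apply', ih]
    by_cases hk : k = 0
    · subst hk
      simp only [pvStep, if_true, List.nil_append, List.append_nil, List.length_replicate]
      rw [if_neg (by exact_mod_cast (by omega : ¬ ((s:Int) ≤ 4000)))]
      norm_num
    · simp only [if_neg hk, pvStep, List.append_nil, List.length_append, List.length_replicate]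
      rw [if_neg (by push_cast; omega)]
      simp [hk]

-- 1 ≤ s ≤ 4000 (cap = 4000/s ≥ 1): after k = cap*y + j iterations (1 ≤ j ≤ cap),
-- y flushes have happened and the buffer holds the j items packed since the last flush
theorem pvIter_main (s : Nat) (hs1 : 0 < s) (hs2 : s ≤ 4000) (k : Nat) (hk : 0 < k) :
    ∃ j y : Nat, (pvStep s)^[k] (([] : List Char), ([] : List Char), (0 : Int)) =
        (List.replicate (j * s) 'x', [], (y : Int)) ∧
      1 ≤ j ∧ j ≤ 4000 / s ∧ k = 4000 / s * y + j := by
  have hcap : 0 < 4000 / s := Nat.div_pos hs2 hs1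
  induction k with
  | zero => omega
  | succ k ih =>
    by_cases hk0 : k = 0
    · subst hk0
      refine ⟨1, 0, ?_, by omega, by omega, by omega⟩
      rw [Function.iterate_one]
      simp only [pvStep, List.nil_append, List.length_replicate]
      rw [if_pos (by exact_mod_cast hs2)]
      simp
    · obtain ⟨j, y, hst, hj1, hj2, hky⟩ := ih (by omega)
      rw [Function.iterate_succ_apply', hst]
      simp only [pvStep, List.append_nil, List.length_append, List.length_replicate]
      by_cases hfit : j + 1 ≤ 4000 / s
      · -- next item still fits: append it
        refine ⟨j + 1, y, ?_, by omega, hfit, by omega⟩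
        rw [if_pos ?_]
        · rw [← List.replicate_add]
          congr 2
          ring
        · have h1 : (j + 1) * s ≤ 4000 / s * s := Nat.mul_le_mul_right s hfit
          have h2 : 4000 / s * s ≤ 4000 := Nat.div_mul_le_self 4000 s
          have h3 : (j + 1) * s = j * s + s := Nat.succ_mul j s
          push_cast
          omega
      · -- buffer is full (j = cap): flush, keep the new item
        have hjcap : j = 4000 / s := by omega
        have hma : 4000 / s * (y + 1) = 4000 / s * y + 4000 / s := by ring
        refine ⟨1, y + 1, ?_, by omega, by omega, by omega⟩
        rw [if_neg ?_]
        · norm_num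
        · have hdm := Nat.div_add_mod 4000 s
          have hmlt : 4000 % s < s := Nat.mod_lt 4000 hs1
          have hcomm : j * s = s * (4000 / s) := by rw [hjcap]; exact Nat.mul_comm _ _
          push_cast
          omega

theorem current_approach_spec : Claim_equal_current_approach := by
  intro n m _
  unfold Spec_current_approach
  show ((PySem.List.pyRange 0 n 1).foldl (fun st _ => pvStep m.toNat st) ([], [], 0)).2.2 =
    current_approach_alt n m
  rw [pvFoldlConst (pvStep m.toNat), PySem.List.length_pyRange_one]
  have hlen : (n - 0).toNat = n.toNat := by omega
  rw [hlen]
  unfold current_approach_alt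
  by_cases hm : m ≤ 0
  · have h0 : m.toNat = 0 := by omega
    rw [h0, pvIter_zero, if_pos (Or.inr hm)]
  · push Not at hm
    by_cases hn : n ≤ 0
    · have h0 : n.toNat = 0 := by omega
      rw [h0, if_pos (Or.inl hn)]
      rfl
    · push Not at hn
      rw [if_neg (by omega)]
      set s := m.toNat with hsdef
      have hs1 : 0 < s := by omega
      have hms : m = (s : Int) := by omega
      have hcapcast : PySem.Int.floordiv 4000 m = ((4000 / s : Nat) : Int) := by
        rw [hms]
        exact_mod_cast PySem.Int.floordiv_natCast 4000 s
      by_cases hbig : 4000 < s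
      · -- nothing fits: every item flushes
        have hcap0 : (4000 : Nat) / s = 0 := Nat.div_eq_of_lt hbig
        rw [pvIter_big s hbig n.toNat]
        simp only [hcapcast, hcap0]
        rw [if_pos (by norm_num)]
        omega
      · push Not at hbig
        obtain ⟨j, y, hst, hj1, hj2, hky⟩ := pvIter_main s hs1 hbig n.toNat (by omega)
        rw [hst]
        simp only [hcapcast]
        have hcap : 0 < 4000 / s := Nat.div_pos hbig hs1
        rw [if_neg (by exact_mod_cast (by omega : ¬ ((4000 / s : Nat) : Int) = 0))]
        have hn1 : n - 1 = ((n.toNat - 1 : Nat) : Int) := by omega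
        rw [hn1, PySem.Int.floordiv_natCast]
        have hmc : y * (4000 / s) = 4000 / s * y := Nat.mul_comm _ _
        have hsc : (y + 1) * (4000 / s) = y * (4000 / s) + 4000 / s := Nat.succ_mul _ _
        have hdiv : (n.toNat - 1) / (4000 / s) = y :=
          Nat.div_eq_of_lt_le (by omega) (by omega)
        rw [hdiv]

-- ===== VERDICT (by name: the statement is the Claim_ definition above) =====
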